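-- pv_equiv track=rewrite | github.com/Kawser-nerd/CLCDSA | Source Codes/AtCoder/arc094/D/2327019.py | solve
-- ===== SOURCE A (Python) =====
-- def solve(s):
--     if all(a == b for a, b in zip(s, s[1:])):
--         return 1
--     if len(s) == 2:
--         return 2
--     elif len(s) == 3:
--         if s[0] == s[1] or s[1] == s[2]:
--             return 6
--         elif s[0] == s[2]:
--             return 7
--         else:
--             return 3
--     # dp[has succession][mod 3][last char]
--     dp = [[[0] * 3 for _ in range(3)] for _ in range(2)]
--     dp[0][0][0] = 1
--     dp[0][1][1] = 1
--     dp[0][2][2] = 1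
--     MOD = 998244353
--     for _ in range(len(s) - 1):
--         ndp = [[[0] * 3 for _ in range(3)] for _ in range(2)]
--         dp0, dp1 = dp
--         ndp0, ndp1 = ndp
--         sdp10, sdp11, sdp12 = sum(dp1[0]), sum(dp1[1]), sum(dp1[2])
--         ndp0[0][0] = (dp0[0][1] + dp0[0][2]) % MOD
--         ndp0[1][0] = (dp0[1][1] + dp0[1][2]) % MOD
--         ndp0[2][0] = (dp0[2][1] + dp0[2][2]) % MOD
--         ndp0[0][1] = (dp0[2][0] + dp0[2][2]) % MOD
--         ndp0[1][1] = (dp0[0][0] + dp0[0][2]) % MOD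
--         ndp0[2][1] = (dp0[1][0] + dp0[1][2]) % MOD
--         ndp0[0][2] = (dp0[1][0] + dp0[1][1]) % MOD
--         ndp0[1][2] = (dp0[2][0] + dp0[2][1]) % MOD
--         ndp0[2][2] = (dp0[0][0] + dp0[0][1]) % MOD
--         ndp1[0][0] = (dp0[0][0] + sdp10) % MOD
--         ndp1[1][0] = (dp0[1][0] + sdp11) % MOD
--         ndp1[2][0] = (dp0[2][0] + sdp12) % MOD
--         ndp1[0][1] = (dp0[2][1] + sdp12) % MOD
--         ndp1[1][1] = (dp0[0][1] + sdp10) % MOD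
--         ndp1[2][1] = (dp0[1][1] + sdp11) % MOD
--         ndp1[0][2] = (dp0[1][2] + sdp11) % MOD
--         ndp1[1][2] = (dp0[2][2] + sdp12) % MOD
--         ndp1[2][2] = (dp0[0][2] + sdp10) % MOD
--         dp = ndp
--     return (sum(dp[1][sum(map(ord, s)) % 3]) + all(a != b for a, b in zip(s, s[1:]))) % MOD
-- ===== SOURCE B (Python) =====
-- MOD = 998244353
--
-- # fixed 18x18 transition matrix over states (has_succession, sum mod 3, last char); index = h*9 + m*3 + c
-- M = [[0, 0, 0, 0, 1, 0, 0, 0, 1, 1, 0, 0, 0, 0, 0, 0, 0, 0], [1, 0, 0, 0, 0, 0, 0, 0, 1, 0, 0, 0, 0, 1, 0, 0, 0, 0], [1, 0, 0, 0, 1, 0, 0, 0, 0, 0, 0, 0, 0, 0, 0, 0, 0, 1], [0, 0, 1, 0, 0, 0, 0, 1, 0, 0, 0, 0, 1, 0, 0, 0, 0, 0], [0, 0, 1, 1, 0, 0, 0, 0, 0, 0, 0, 0, 0, 0, 0, 0, 1, 0], [0, 0, 0, 1, 0, 0, 0, 1, 0, 0, 0, 1, 0, 0, 0, 0, 0, 0],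 [0, 1, 0, 0, 0, 1, 0, 0, 0, 0, 0, 0, 0, 0, 0, 1, 0, 0], [0, 0, 0, 0, 0, 1, 1, 0, 0, 0, 1, 0, 0, 0, 0, 0, 0, 0], [0, 1, 0, 0, 0, 0, 1, 0, 0, 0, 0, 0, 0, 0, 1, 0, 0, 0], [0, 0, 0, 0, 0, 0, 0, 0, 0, 1, 0, 0, 0, 1, 0, 0, 0, 1], [0, 0, 0, 0, 0, 0, 0, 0, 0, 1, 0, 0, 0, 1, 0, 0, 0, 1], [0, 0, 0, 0, 0, 0, 0, 0, 0, 1, 0, 0, 0, 1, 0, 0, 0, 1], [0, 0, 0, 0, 0, 0, 0, 0, 0, 0, 0, 1, 1, 0, 0, 0, 1, 0], [0, 0, 0, 0, 0, 0, 0, 0, 0, 0, 0, 1, 1, 0, 0, 0, 1, 0], [0, 0, 0, 0, 0, 0, 0, 0, 0, 0, 0, 1, 1, 0, 0, 0, 1, 0], [0, 0, 0, 0, 0, 0, 0, 0, 0, 0, 1, 0, 0, 0, 1, 1, 0, 0], [0, 0, 0, 0, 0, 0, 0, 0, 0, 0, 1, 0, 0, 0, 1, 1, 0, 0], [0, 0,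 0, 0, 0, 0, 0, 0, 0, 0, 1, 0, 0, 0, 1, 1, 0, 0]]
--
-- def _matmul(A, B):
--     return [[sum(A[i][k] * B[k][j] for k in range(18)) % MOD for j in range(18)]
--             for i in range(18)]
--
-- def _matpow(A, e):
--     R = [[1 if i == j else 0 for j in range(18)] for i in range(18)]
--     while e:
--         if e & 1:
--             R = _matmul(R, A)
--         A = _matmul(A, A)
--         e >>= 1
--     return R
--
-- def solve(s):
--     if all(a == b for a, b in zip(s, s[1:])):
--         return 1
--     if len(s) == 2:
--         return 2
--     if len(s) == 3:
--         if s[0] == s[1] or s[1] == s[2]: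
--             return 6
--         if s[0] == s[2]:
--             return 7
--         return 3
--     P = _matpow(M, len(s) - 1)
--     v0 = [1 if i in (0, 4, 8) else 0 for i in range(18)]
--     v = [sum(v0[i] * P[i][j] for i in range(18)) % MOD for j in range(18)]
--     r = sum(map(ord, s)) % 3
--     ans = sum(v[9 + 3 * r + c] for c in range(3))
--     return (ans + all(a != b for a, b in zip(s, s[1:]))) % MOD
-- ===== Notes on version B (the rewrite author's own statement) =====
-- stated objective: faster
-- what changed: Replaces A's per-character loop over the 18-state DP with binary exponentiation of the fixed 18x18 transition matrix applied to the initial state vector.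
import Mathlib
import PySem

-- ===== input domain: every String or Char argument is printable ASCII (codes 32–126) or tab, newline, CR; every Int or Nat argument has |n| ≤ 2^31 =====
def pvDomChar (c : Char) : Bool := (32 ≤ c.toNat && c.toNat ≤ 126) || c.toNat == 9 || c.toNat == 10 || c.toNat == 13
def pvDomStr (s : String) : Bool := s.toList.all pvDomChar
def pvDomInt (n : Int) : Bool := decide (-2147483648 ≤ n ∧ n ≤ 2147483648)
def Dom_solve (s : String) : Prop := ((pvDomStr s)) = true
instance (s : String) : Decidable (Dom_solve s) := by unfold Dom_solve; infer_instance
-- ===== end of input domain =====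

-- B replaces A's O(n) step-by-step 18-state DP loop with binary exponentiation of the
-- fixed 18×18 transition matrix (O(log n) matrix powers); same value everywhere.

-- ===== PORT A =====

-- all(a == b for a, b in zip(s, s[1:]))
def pvAllEqAdj (l : List Char) : Bool := (l.zip l.tail).all (fun p => p.1 == p.2)
-- all(a != b for a, b in zip(s, s[1:]))
def pvAllNeAdj (l : List Char) : Bool := (l.zip l.tail).all (fun p => p.1 != p.2)
-- sum(map(ord, s))
def pvOrdSum (l : List Char) : Int := (l.map (fun c => (c.toNat : Int))).sum

-- dp[has succession][mod 3][last char]: field aMC = dp[0][M][C], bMC = dp[1][M][C]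
structure StA where
  (a00 a01 a02 a10 a11 a12 a20 a21 a22 : Int)
  (b00 b01 b02 b10 b11 b12 b20 b21 b22 : Int)
deriving Repr, DecidableEq

-- dp[0][0][0] = dp[0][1][1] = dp[0][2][2] = 1, everything else 0
def initA : StA :=
  ⟨1,0,0, 0,1,0, 0,0,1, 0,0,0, 0,0,0, 0,0,0⟩

-- one iteration of A's loop body (the 18 assignments, verbatim)
def stepA (d : StA) : StA :=
  let sdp10 := d.b00 + d.b01 + d.b02
  let sdp11 := d.b10 + d.b11 + d.b12
  let sdp12 := d.b20 + d.b21 + d.b22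
  { a00 := PySem.Int.mod (d.a01 + d.a02) 998244353
    a10 := PySem.Int.mod (d.a11 + d.a12) 998244353
    a20 := PySem.Int.mod (d.a21 + d.a22) 998244353
    a01 := PySem.Int.mod (d.a20 + d.a22) 998244353
    a11 := PySem.Int.mod (d.a00 + d.a02) 998244353
    a21 := PySem.Int.mod (d.a10 + d.a12) 998244353
    a02 := PySem.Int.mod (d.a10 + d.a11) 998244353
    a12 := PySem.Int.mod (d.a20 + d.a21) 998244353
    a22 := PySem.Int.mod (d.a00 + d.a01) 998244353
    b00 := PySem.Int.mod (d.a00 + sdp10) 998244353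
    b10 := PySem.Int.mod (d.a10 + sdp11) 998244353
    b20 := PySem.Int.mod (d.a20 + sdp12) 998244353
    b01 := PySem.Int.mod (d.a21 + sdp12) 998244353
    b11 := PySem.Int.mod (d.a01 + sdp10) 998244353
    b21 := PySem.Int.mod (d.a11 + sdp11) 998244353
    b02 := PySem.Int.mod (d.a12 + sdp11) 998244353
    b12 := PySem.Int.mod (d.a22 + sdp12) 998244353
    b22 := PySem.Int.mod (d.a02 + sdp10) 998244353 }

def solve (s : String) : Int :=
  let l := s.toList
  if pvAllEqAdj l then 1
  else if l.length = 2 then 2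
  else if l.length = 3 then
    match l with
    | [x, y, z] =>
      if x == y || y == z then 6
      else if x == z then 7
      else 3
    | _ => 0  -- unreachable: guarded by length = 3
  else
    let d := stepA^[l.length - 1] initA
    let r := PySem.Int.mod (pvOrdSum l) 3
    let row :=
      if r = 0 then d.b00 + d.b01 + d.b02
      else if r = 1 then d.b10 + d.b11 + d.b12
      else d.b20 + d.b21 + d.b22
    PySem.Int.mod (row + (if pvAllNeAdj l then 1 else 0)) 998244353

-- ===== PORT B =====

-- all(a == b for a, b in zip(s, s[1:]))
def pvAllEqAdjB (l : List Char) : Bool := (l.zip l.tail).all (fun p => p.1 == p.2)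
-- all(a != b for a, b in zip(s, s[1:]))
def pvAllNeAdjB (l : List Char) : Bool := (l.zip l.tail).all (fun p => p.1 != p.2)
-- sum(map(ord, s))
def pvOrdSumB (l : List Char) : Int := (l.map (fun c => (c.toNat : Int))).sum

def matB : List (List Int) :=
  [[0,0,0,0,1,0,0,0,1,1,0,0,0,0,0,0,0,0],
   [1,0,0,0,0,0,0,0,1,0,0,0,0,1,0,0,0,0],
   [1,0,0,0,1,0,0,0,0,0,0,0,0,0,0,0,0,1],
   [0,0,1,0,0,0,0,1,0,0,0,0,1,0,0,0,0,0],
   [0,0,1,1,0,0,0,0,0,0,0,0,0,0,0,0,1,0],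
   [0,0,0,1,0,0,0,1,0,0,0,1,0,0,0,0,0,0],
   [0,1,0,0,0,1,0,0,0,0,0,0,0,0,0,1,0,0],
   [0,0,0,0,0,1,1,0,0,0,1,0,0,0,0,0,0,0],
   [0,1,0,0,0,0,1,0,0,0,0,0,0,0,1,0,0,0],
   [0,0,0,0,0,0,0,0,0,1,0,0,0,1,0,0,0,1],
   [0,0,0,0,0,0,0,0,0,1,0,0,0,1,0,0,0,1],
   [0,0,0,0,0,0,0,0,0,1,0,0,0,1,0,0,0,1],
   [0,0,0,0,0,0,0,0,0,0,0,1,1,0,0,0,1,0],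
   [0,0,0,0,0,0,0,0,0,0,0,1,1,0,0,0,1,0],
   [0,0,0,0,0,0,0,0,0,0,0,1,1,0,0,0,1,0],
   [0,0,0,0,0,0,0,0,0,0,1,0,0,0,1,1,0,0],
   [0,0,0,0,0,0,0,0,0,0,1,0,0,0,1,1,0,0],
   [0,0,0,0,0,0,0,0,0,0,1,0,0,0,1,1,0,0]]

-- [[sum(A[i][k]*B[k][j] for k in range(18)) % MOD for j in range(18)] for i in range(18)]
def matmulB (A B : List (List Int)) : List (List Int) :=
  (List.range 18).map (fun i => (List.range 18).map (fun j =>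
    PySem.Int.mod (((List.range 18).map (fun k =>
      (A.getD i []).getD k 0 * (B.getD k []).getD j 0)).sum) 998244353))

-- identity matrix, the starting R of _matpow
def idB : List (List Int) :=
  (List.range 18).map (fun i => (List.range 18).map (fun j => if i = j then (1:Int) else 0))

-- _matpow's while-loop: R accumulates, A squares, e halves
def matpowB (A R : List (List Int)) (e : Nat) : List (List Int) :=
  if h : e = 0 then R
  else matpowB (matmulB A A) (if e % 2 = 1 then matmulB R A else R) (e / 2)
termination_by e
decreasing_by exact Nat.div_lt_self (Nat.pos_of_ne_zero h) (by norm_num)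

-- v0 = [1 if i in (0, 4, 8) else 0 for i in range(18)]
def v0B : List Int :=
  (List.range 18).map (fun i => if i = 0 ∨ i = 4 ∨ i = 8 then (1:Int) else 0)

def solve_alt (s : String) : Int :=
  let l := s.toList
  if pvAllEqAdjB l then 1
  else if l.length = 2 then 2
  else if l.length = 3 then
    -- s[0], s[1], s[2] via Python indexing (in range: guarded by length = 3)
    let c0 := PySem.List.pyGet? l 0
    let c1 := PySem.List.pyGet? l 1
    let c2 := PySem.List.pyGet? l 2
    if c0 == c1 || c1 == c2 then 6
    else if c0 == c2 then 7
    else 3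
  else
    let P := matpowB matB idB (l.length - 1)
    let v : List Int := (List.range 18).map (fun j =>
      PySem.Int.mod (((List.range 18).map (fun i =>
        v0B.getD i 0 * (P.getD i []).getD j 0)).sum) 998244353)
    let r := PySem.Int.mod (pvOrdSumB l) 3
    let ans :=
      if r = 0 then v.getD 9 0 + v.getD 10 0 + v.getD 11 0
      else if r = 1 then v.getD 12 0 + v.getD 13 0 + v.getD 14 0
      else v.getD 15 0 + v.getD 16 0 + v.getD 17 0
    PySem.Int.mod (ans + (if pvAllNeAdjB l then 1 else 0)) 998244353

-- ===== PRECONDITION & SPEC =====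
def Spec_solve (s : String) (out : Int) : Prop := out = solve_alt s
instance (s : String) (out : Int) : Decidable (Spec_solve s out) := by unfold Spec_solve; infer_instance

-- ===== CLAIM (what is proved, stated in full; the proofs are below) =====
def Claim_equal_solve : Prop := ∀ (s : String), Dom_solve s → Spec_solve s (solve s)

-- ===== LEMMAS AND PROOFS =====

set_option maxHeartbeats 2000000

theorem castZ_mod (a : Int) :
    ((PySem.Int.mod a 998244353 : Int) : ZMod 998244353) = (a : ZMod 998244353) := by
  rw [PySem.Int.mod_eq_emod_of_pos (by norm_num)]
  have h : ((998244353 : ℤ)) = ((998244353 : ℕ) : ℤ) := by norm_num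
  rw [h, ZMod.intCast_mod]

theorem mod_eq_of_castZ {x y : Int}
    (h : ((x : Int) : ZMod 998244353) = ((y : Int) : ZMod 998244353)) :
    PySem.Int.mod x 998244353 = PySem.Int.mod y 998244353 := by
  rw [PySem.Int.mod_eq_emod_of_pos (by norm_num), PySem.Int.mod_eq_emod_of_pos (by norm_num)]
  have h2 : x ≡ y [ZMOD (998244353 : ℕ)] := (ZMod.intCast_eq_intCast_iff _ _ _).mp h
  have h3 : x % ((998244353 : ℕ) : ℤ) = y % ((998244353 : ℕ) : ℤ) := h2
  norm_num at h3
  exact h3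

-- the state of A's dp as a vector over ZMod 998244353, index h*9 + m*3 + c
def castV (d : StA) : Fin 18 → ZMod 998244353 :=
  ![(d.a00 : ZMod 998244353), d.a01, d.a02, d.a10, d.a11, d.a12, d.a20, d.a21, d.a22,
    d.b00, d.b01, d.b02, d.b10, d.b11, d.b12, d.b20, d.b21, d.b22]

-- entry A[i][j] of a list-of-lists matrix
def entB (A : List (List Int)) (i j : Nat) : Int := (A.getD i []).getD j 0

theorem getD_mapRange {α : Type} (f : ℕ → α) (d : α) (i : ℕ) (h : i < 18) :
    ((List.range 18).map f).getD i d = f i := by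
  rw [List.getD_eq_getElem?_getD]
  simp [List.getElem?_map, List.getElem?_range, h]

theorem listsum18 (f : ℕ → Int) : ((List.range 18).map f).sum = ∑ k : Fin 18, f k.val := by
  simp [List.range_succ, Fin.sum_univ_succ]

def castM (A : List (List Int)) : Matrix (Fin 18) (Fin 18) (ZMod 998244353) :=
  Matrix.of fun i j => ((entB A i.val j.val : Int) : ZMod 998244353)

def Mz : Matrix (Fin 18) (Fin 18) (ZMod 998244353) := castM matB

theorem sum18 (f : Fin 18 → ZMod 998244353) : (∑ i, f i) =
  f 0 + f 1 + f 2 + f 3 + f 4 + f 5 + f 6 + f 7 + f 8 + f 9 + f 10 + f 11 + f 12 + f 13 + f 14 + f 15 + f 16 + f 17 := by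
  simp [Fin.sum_univ_succ]
  ring

theorem vecMulApply18 (v : Fin 18 → ZMod 998244353) (A : Matrix (Fin 18) (Fin 18) (ZMod 998244353)) (j : Fin 18) :
    Matrix.vecMul v A j = ∑ i : Fin 18, v i * A i j := rfl

theorem castV_app_0 (e : StA) : castV e 0 = ((e.a00 : Int) : ZMod 998244353) := rfl
theorem castV_app_1 (e : StA) : castV e 1 = ((e.a01 : Int) : ZMod 998244353) := rfl
theorem castV_app_2 (e : StA) : castV e 2 = ((e.a02 : Int) : ZMod 998244353) := rfl
theorem castV_app_3 (e : StA) : castV e 3 = ((e.a10 : Int) : ZMod 998244353) := rfl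
theorem castV_app_4 (e : StA) : castV e 4 = ((e.a11 : Int) : ZMod 998244353) := rfl
theorem castV_app_5 (e : StA) : castV e 5 = ((e.a12 : Int) : ZMod 998244353) := rfl
theorem castV_app_6 (e : StA) : castV e 6 = ((e.a20 : Int) : ZMod 998244353) := rfl
theorem castV_app_7 (e : StA) : castV e 7 = ((e.a21 : Int) : ZMod 998244353) := rfl
theorem castV_app_8 (e : StA) : castV e 8 = ((e.a22 : Int) : ZMod 998244353) := rfl
theorem castV_app_9 (e : StA) : castV e 9 = ((e.b00 : Int) : ZMod 998244353) := rfl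
theorem castV_app_10 (e : StA) : castV e 10 = ((e.b01 : Int) : ZMod 998244353) := rfl
theorem castV_app_11 (e : StA) : castV e 11 = ((e.b02 : Int) : ZMod 998244353) := rfl
theorem castV_app_12 (e : StA) : castV e 12 = ((e.b10 : Int) : ZMod 998244353) := rfl
theorem castV_app_13 (e : StA) : castV e 13 = ((e.b11 : Int) : ZMod 998244353) := rfl
theorem castV_app_14 (e : StA) : castV e 14 = ((e.b12 : Int) : ZMod 998244353) := rfl
theorem castV_app_15 (e : StA) : castV e 15 = ((e.b20 : Int) : ZMod 998244353) := rfl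
theorem castV_app_16 (e : StA) : castV e 16 = ((e.b21 : Int) : ZMod 998244353) := rfl
theorem castV_app_17 (e : StA) : castV e 17 = ((e.b22 : Int) : ZMod 998244353) := rfl

theorem Mz_0_0 : Mz 0 0 = 0 := by decide
theorem Mz_0_1 : Mz 0 1 = 0 := by decide
theorem Mz_0_2 : Mz 0 2 = 0 := by decide
theorem Mz_0_3 : Mz 0 3 = 0 := by decide
theorem Mz_0_4 : Mz 0 4 = 1 := by decide
theorem Mz_0_5 : Mz 0 5 = 0 := by decide
theorem Mz_0_6 : Mz 0 6 = 0 := by decide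
theorem Mz_0_7 : Mz 0 7 = 0 := by decide
theorem Mz_0_8 : Mz 0 8 = 1 := by decide
theorem Mz_0_9 : Mz 0 9 = 1 := by decide
theorem Mz_0_10 : Mz 0 10 = 0 := by decide
theorem Mz_0_11 : Mz 0 11 = 0 := by decide
theorem Mz_0_12 : Mz 0 12 = 0 := by decide
theorem Mz_0_13 : Mz 0 13 = 0 := by decide
theorem Mz_0_14 : Mz 0 14 = 0 := by decide
theorem Mz_0_15 : Mz 0 15 = 0 := by decide
theorem Mz_0_16 : Mz 0 16 = 0 := by decide
theorem Mz_0_17 : Mz 0 17 = 0 := by decide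
theorem Mz_1_0 : Mz 1 0 = 1 := by decide
theorem Mz_1_1 : Mz 1 1 = 0 := by decide
theorem Mz_1_2 : Mz 1 2 = 0 := by decide
theorem Mz_1_3 : Mz 1 3 = 0 := by decide
theorem Mz_1_4 : Mz 1 4 = 0 := by decide
theorem Mz_1_5 : Mz 1 5 = 0 := by decide
theorem Mz_1_6 : Mz 1 6 = 0 := by decide
theorem Mz_1_7 : Mz 1 7 = 0 := by decide
theorem Mz_1_8 : Mz 1 8 = 1 := by decide
theorem Mz_1_9 : Mz 1 9 = 0 := by decide
theorem Mz_1_10 : Mz 1 10 = 0 := by decide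
theorem Mz_1_11 : Mz 1 11 = 0 := by decide
theorem Mz_1_12 : Mz 1 12 = 0 := by decide
theorem Mz_1_13 : Mz 1 13 = 1 := by decide
theorem Mz_1_14 : Mz 1 14 = 0 := by decide
theorem Mz_1_15 : Mz 1 15 = 0 := by decide
theorem Mz_1_16 : Mz 1 16 = 0 := by decide
theorem Mz_1_17 : Mz 1 17 = 0 := by decide
theorem Mz_2_0 : Mz 2 0 = 1 := by decide
theorem Mz_2_1 : Mz 2 1 = 0 := by decide
theorem Mz_2_2 : Mz 2 2 = 0 := by decide
theorem Mz_2_3 : Mz 2 3 = 0 := by decide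
theorem Mz_2_4 : Mz 2 4 = 1 := by decide
theorem Mz_2_5 : Mz 2 5 = 0 := by decide
theorem Mz_2_6 : Mz 2 6 = 0 := by decide
theorem Mz_2_7 : Mz 2 7 = 0 := by decide
theorem Mz_2_8 : Mz 2 8 = 0 := by decide
theorem Mz_2_9 : Mz 2 9 = 0 := by decide
theorem Mz_2_10 : Mz 2 10 = 0 := by decide
theorem Mz_2_11 : Mz 2 11 = 0 := by decide
theorem Mz_2_12 : Mz 2 12 = 0 := by decide
theorem Mz_2_13 : Mz 2 13 = 0 := by decide
theorem Mz_2_14 : Mz 2 14 = 0 := by decide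
theorem Mz_2_15 : Mz 2 15 = 0 := by decide
theorem Mz_2_16 : Mz 2 16 = 0 := by decide
theorem Mz_2_17 : Mz 2 17 = 1 := by decide
theorem Mz_3_0 : Mz 3 0 = 0 := by decide
theorem Mz_3_1 : Mz 3 1 = 0 := by decide
theorem Mz_3_2 : Mz 3 2 = 1 := by decide
theorem Mz_3_3 : Mz 3 3 = 0 := by decide
theorem Mz_3_4 : Mz 3 4 = 0 := by decide
theorem Mz_3_5 : Mz 3 5 = 0 := by decide
theorem Mz_3_6 : Mz 3 6 = 0 := by decide
theorem Mz_3_7 : Mz 3 7 = 1 := by decide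
theorem Mz_3_8 : Mz 3 8 = 0 := by decide
theorem Mz_3_9 : Mz 3 9 = 0 := by decide
theorem Mz_3_10 : Mz 3 10 = 0 := by decide
theorem Mz_3_11 : Mz 3 11 = 0 := by decide
theorem Mz_3_12 : Mz 3 12 = 1 := by decide
theorem Mz_3_13 : Mz 3 13 = 0 := by decide
theorem Mz_3_14 : Mz 3 14 = 0 := by decide
theorem Mz_3_15 : Mz 3 15 = 0 := by decide
theorem Mz_3_16 : Mz 3 16 = 0 := by decide
theorem Mz_3_17 : Mz 3 17 = 0 := by decide
theorem Mz_4_0 : Mz 4 0 = 0 := by decide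
theorem Mz_4_1 : Mz 4 1 = 0 := by decide
theorem Mz_4_2 : Mz 4 2 = 1 := by decide
theorem Mz_4_3 : Mz 4 3 = 1 := by decide
theorem Mz_4_4 : Mz 4 4 = 0 := by decide
theorem Mz_4_5 : Mz 4 5 = 0 := by decide
theorem Mz_4_6 : Mz 4 6 = 0 := by decide
theorem Mz_4_7 : Mz 4 7 = 0 := by decide
theorem Mz_4_8 : Mz 4 8 = 0 := by decide
theorem Mz_4_9 : Mz 4 9 = 0 := by decide
theorem Mz_4_10 : Mz 4 10 = 0 := by decide
theorem Mz_4_11 : Mz 4 11 = 0 := by decide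
theorem Mz_4_12 : Mz 4 12 = 0 := by decide
theorem Mz_4_13 : Mz 4 13 = 0 := by decide
theorem Mz_4_14 : Mz 4 14 = 0 := by decide
theorem Mz_4_15 : Mz 4 15 = 0 := by decide
theorem Mz_4_16 : Mz 4 16 = 1 := by decide
theorem Mz_4_17 : Mz 4 17 = 0 := by decide
theorem Mz_5_0 : Mz 5 0 = 0 := by decide
theorem Mz_5_1 : Mz 5 1 = 0 := by decide
theorem Mz_5_2 : Mz 5 2 = 0 := by decide
theorem Mz_5_3 : Mz 5 3 = 1 := by decide
theorem Mz_5_4 : Mz 5 4 = 0 := by decide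
theorem Mz_5_5 : Mz 5 5 = 0 := by decide
theorem Mz_5_6 : Mz 5 6 = 0 := by decide
theorem Mz_5_7 : Mz 5 7 = 1 := by decide
theorem Mz_5_8 : Mz 5 8 = 0 := by decide
theorem Mz_5_9 : Mz 5 9 = 0 := by decide
theorem Mz_5_10 : Mz 5 10 = 0 := by decide
theorem Mz_5_11 : Mz 5 11 = 1 := by decide
theorem Mz_5_12 : Mz 5 12 = 0 := by decide
theorem Mz_5_13 : Mz 5 13 = 0 := by decide
theorem Mz_5_14 : Mz 5 14 = 0 := by decide
theorem Mz_5_15 : Mz 5 15 = 0 := by decide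
theorem Mz_5_16 : Mz 5 16 = 0 := by decide
theorem Mz_5_17 : Mz 5 17 = 0 := by decide
theorem Mz_6_0 : Mz 6 0 = 0 := by decide
theorem Mz_6_1 : Mz 6 1 = 1 := by decide
theorem Mz_6_2 : Mz 6 2 = 0 := by decide
theorem Mz_6_3 : Mz 6 3 = 0 := by decide
theorem Mz_6_4 : Mz 6 4 = 0 := by decide
theorem Mz_6_5 : Mz 6 5 = 1 := by decide
theorem Mz_6_6 : Mz 6 6 = 0 := by decide
theorem Mz_6_7 : Mz 6 7 = 0 := by decide
theorem Mz_6_8 : Mz 6 8 = 0 := by decide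
theorem Mz_6_9 : Mz 6 9 = 0 := by decide
theorem Mz_6_10 : Mz 6 10 = 0 := by decide
theorem Mz_6_11 : Mz 6 11 = 0 := by decide
theorem Mz_6_12 : Mz 6 12 = 0 := by decide
theorem Mz_6_13 : Mz 6 13 = 0 := by decide
theorem Mz_6_14 : Mz 6 14 = 0 := by decide
theorem Mz_6_15 : Mz 6 15 = 1 := by decide
theorem Mz_6_16 : Mz 6 16 = 0 := by decide
theorem Mz_6_17 : Mz 6 17 = 0 := by decide
theorem Mz_7_0 : Mz 7 0 = 0 := by decide
theorem Mz_7_1 : Mz 7 1 = 0 := by decide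
theorem Mz_7_2 : Mz 7 2 = 0 := by decide
theorem Mz_7_3 : Mz 7 3 = 0 := by decide
theorem Mz_7_4 : Mz 7 4 = 0 := by decide
theorem Mz_7_5 : Mz 7 5 = 1 := by decide
theorem Mz_7_6 : Mz 7 6 = 1 := by decide
theorem Mz_7_7 : Mz 7 7 = 0 := by decide
theorem Mz_7_8 : Mz 7 8 = 0 := by decide
theorem Mz_7_9 : Mz 7 9 = 0 := by decide
theorem Mz_7_10 : Mz 7 10 = 1 := by decide
theorem Mz_7_11 : Mz 7 11 = 0 := by decide
theorem Mz_7_12 : Mz 7 12 = 0 := by decide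
theorem Mz_7_13 : Mz 7 13 = 0 := by decide
theorem Mz_7_14 : Mz 7 14 = 0 := by decide
theorem Mz_7_15 : Mz 7 15 = 0 := by decide
theorem Mz_7_16 : Mz 7 16 = 0 := by decide
theorem Mz_7_17 : Mz 7 17 = 0 := by decide
theorem Mz_8_0 : Mz 8 0 = 0 := by decide
theorem Mz_8_1 : Mz 8 1 = 1 := by decide
theorem Mz_8_2 : Mz 8 2 = 0 := by decide
theorem Mz_8_3 : Mz 8 3 = 0 := by decide
theorem Mz_8_4 : Mz 8 4 = 0 := by decide
theorem Mz_8_5 : Mz 8 5 = 0 := by decide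
theorem Mz_8_6 : Mz 8 6 = 1 := by decide
theorem Mz_8_7 : Mz 8 7 = 0 := by decide
theorem Mz_8_8 : Mz 8 8 = 0 := by decide
theorem Mz_8_9 : Mz 8 9 = 0 := by decide
theorem Mz_8_10 : Mz 8 10 = 0 := by decide
theorem Mz_8_11 : Mz 8 11 = 0 := by decide
theorem Mz_8_12 : Mz 8 12 = 0 := by decide
theorem Mz_8_13 : Mz 8 13 = 0 := by decide
theorem Mz_8_14 : Mz 8 14 = 1 := by decide
theorem Mz_8_15 : Mz 8 15 = 0 := by decide
theorem Mz_8_16 : Mz 8 16 = 0 := by decide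
theorem Mz_8_17 : Mz 8 17 = 0 := by decide
theorem Mz_9_0 : Mz 9 0 = 0 := by decide
theorem Mz_9_1 : Mz 9 1 = 0 := by decide
theorem Mz_9_2 : Mz 9 2 = 0 := by decide
theorem Mz_9_3 : Mz 9 3 = 0 := by decide
theorem Mz_9_4 : Mz 9 4 = 0 := by decide
theorem Mz_9_5 : Mz 9 5 = 0 := by decide
theorem Mz_9_6 : Mz 9 6 = 0 := by decide
theorem Mz_9_7 : Mz 9 7 = 0 := by decide
theorem Mz_9_8 : Mz 9 8 = 0 := by decide
theorem Mz_9_9 : Mz 9 9 = 1 := by decide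
theorem Mz_9_10 : Mz 9 10 = 0 := by decide
theorem Mz_9_11 : Mz 9 11 = 0 := by decide
theorem Mz_9_12 : Mz 9 12 = 0 := by decide
theorem Mz_9_13 : Mz 9 13 = 1 := by decide
theorem Mz_9_14 : Mz 9 14 = 0 := by decide
theorem Mz_9_15 : Mz 9 15 = 0 := by decide
theorem Mz_9_16 : Mz 9 16 = 0 := by decide
theorem Mz_9_17 : Mz 9 17 = 1 := by decide
theorem Mz_10_0 : Mz 10 0 = 0 := by decide
theorem Mz_10_1 : Mz 10 1 = 0 := by decide
theorem Mz_10_2 : Mz 10 2 = 0 := by decide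
theorem Mz_10_3 : Mz 10 3 = 0 := by decide
theorem Mz_10_4 : Mz 10 4 = 0 := by decide
theorem Mz_10_5 : Mz 10 5 = 0 := by decide
theorem Mz_10_6 : Mz 10 6 = 0 := by decide
theorem Mz_10_7 : Mz 10 7 = 0 := by decide
theorem Mz_10_8 : Mz 10 8 = 0 := by decide
theorem Mz_10_9 : Mz 10 9 = 1 := by decide
theorem Mz_10_10 : Mz 10 10 = 0 := by decide
theorem Mz_10_11 : Mz 10 11 = 0 := by decide
theorem Mz_10_12 : Mz 10 12 = 0 := by decide
theorem Mz_10_13 : Mz 10 13 = 1 := by decide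
theorem Mz_10_14 : Mz 10 14 = 0 := by decide
theorem Mz_10_15 : Mz 10 15 = 0 := by decide
theorem Mz_10_16 : Mz 10 16 = 0 := by decide
theorem Mz_10_17 : Mz 10 17 = 1 := by decide
theorem Mz_11_0 : Mz 11 0 = 0 := by decide
theorem Mz_11_1 : Mz 11 1 = 0 := by decide
theorem Mz_11_2 : Mz 11 2 = 0 := by decide
theorem Mz_11_3 : Mz 11 3 = 0 := by decide
theorem Mz_11_4 : Mz 11 4 = 0 := by decide
theorem Mz_11_5 : Mz 11 5 = 0 := by decide
theorem Mz_11_6 : Mz 11 6 = 0 := by decide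
theorem Mz_11_7 : Mz 11 7 = 0 := by decide
theorem Mz_11_8 : Mz 11 8 = 0 := by decide
theorem Mz_11_9 : Mz 11 9 = 1 := by decide
theorem Mz_11_10 : Mz 11 10 = 0 := by decide
theorem Mz_11_11 : Mz 11 11 = 0 := by decide
theorem Mz_11_12 : Mz 11 12 = 0 := by decide
theorem Mz_11_13 : Mz 11 13 = 1 := by decide
theorem Mz_11_14 : Mz 11 14 = 0 := by decide
theorem Mz_11_15 : Mz 11 15 = 0 := by decide
theorem Mz_11_16 : Mz 11 16 = 0 := by decide
theorem Mz_11_17 : Mz 11 17 = 1 := by decide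
theorem Mz_12_0 : Mz 12 0 = 0 := by decide
theorem Mz_12_1 : Mz 12 1 = 0 := by decide
theorem Mz_12_2 : Mz 12 2 = 0 := by decide
theorem Mz_12_3 : Mz 12 3 = 0 := by decide
theorem Mz_12_4 : Mz 12 4 = 0 := by decide
theorem Mz_12_5 : Mz 12 5 = 0 := by decide
theorem Mz_12_6 : Mz 12 6 = 0 := by decide
theorem Mz_12_7 : Mz 12 7 = 0 := by decide
theorem Mz_12_8 : Mz 12 8 = 0 := by decide
theorem Mz_12_9 : Mz 12 9 = 0 := by decide
theorem Mz_12_10 : Mz 12 10 = 0 := by decide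
theorem Mz_12_11 : Mz 12 11 = 1 := by decide
theorem Mz_12_12 : Mz 12 12 = 1 := by decide
theorem Mz_12_13 : Mz 12 13 = 0 := by decide
theorem Mz_12_14 : Mz 12 14 = 0 := by decide
theorem Mz_12_15 : Mz 12 15 = 0 := by decide
theorem Mz_12_16 : Mz 12 16 = 1 := by decide
theorem Mz_12_17 : Mz 12 17 = 0 := by decide
theorem Mz_13_0 : Mz 13 0 = 0 := by decide
theorem Mz_13_1 : Mz 13 1 = 0 := by decide
theorem Mz_13_2 : Mz 13 2 = 0 := by decide
theorem Mz_13_3 : Mz 13 3 = 0 := by decide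
theorem Mz_13_4 : Mz 13 4 = 0 := by decide
theorem Mz_13_5 : Mz 13 5 = 0 := by decide
theorem Mz_13_6 : Mz 13 6 = 0 := by decide
theorem Mz_13_7 : Mz 13 7 = 0 := by decide
theorem Mz_13_8 : Mz 13 8 = 0 := by decide
theorem Mz_13_9 : Mz 13 9 = 0 := by decide
theorem Mz_13_10 : Mz 13 10 = 0 := by decide
theorem Mz_13_11 : Mz 13 11 = 1 := by decide
theorem Mz_13_12 : Mz 13 12 = 1 := by decide
theorem Mz_13_13 : Mz 13 13 = 0 := by decide
theorem Mz_13_14 : Mz 13 14 = 0 := by decide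
theorem Mz_13_15 : Mz 13 15 = 0 := by decide
theorem Mz_13_16 : Mz 13 16 = 1 := by decide
theorem Mz_13_17 : Mz 13 17 = 0 := by decide
theorem Mz_14_0 : Mz 14 0 = 0 := by decide
theorem Mz_14_1 : Mz 14 1 = 0 := by decide
theorem Mz_14_2 : Mz 14 2 = 0 := by decide
theorem Mz_14_3 : Mz 14 3 = 0 := by decide
theorem Mz_14_4 : Mz 14 4 = 0 := by decide
theorem Mz_14_5 : Mz 14 5 = 0 := by decide
theorem Mz_14_6 : Mz 14 6 = 0 := by decide
theorem Mz_14_7 : Mz 14 7 = 0 := by decide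
theorem Mz_14_8 : Mz 14 8 = 0 := by decide
theorem Mz_14_9 : Mz 14 9 = 0 := by decide
theorem Mz_14_10 : Mz 14 10 = 0 := by decide
theorem Mz_14_11 : Mz 14 11 = 1 := by decide
theorem Mz_14_12 : Mz 14 12 = 1 := by decide
theorem Mz_14_13 : Mz 14 13 = 0 := by decide
theorem Mz_14_14 : Mz 14 14 = 0 := by decide
theorem Mz_14_15 : Mz 14 15 = 0 := by decide
theorem Mz_14_16 : Mz 14 16 = 1 := by decide
theorem Mz_14_17 : Mz 14 17 = 0 := by decide
theorem Mz_15_0 : Mz 15 0 = 0 := by decide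
theorem Mz_15_1 : Mz 15 1 = 0 := by decide
theorem Mz_15_2 : Mz 15 2 = 0 := by decide
theorem Mz_15_3 : Mz 15 3 = 0 := by decide
theorem Mz_15_4 : Mz 15 4 = 0 := by decide
theorem Mz_15_5 : Mz 15 5 = 0 := by decide
theorem Mz_15_6 : Mz 15 6 = 0 := by decide
theorem Mz_15_7 : Mz 15 7 = 0 := by decide
theorem Mz_15_8 : Mz 15 8 = 0 := by decide
theorem Mz_15_9 : Mz 15 9 = 0 := by decide
theorem Mz_15_10 : Mz 15 10 = 1 := by decide
theorem Mz_15_11 : Mz 15 11 = 0 := by decide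
theorem Mz_15_12 : Mz 15 12 = 0 := by decide
theorem Mz_15_13 : Mz 15 13 = 0 := by decide
theorem Mz_15_14 : Mz 15 14 = 1 := by decide
theorem Mz_15_15 : Mz 15 15 = 1 := by decide
theorem Mz_15_16 : Mz 15 16 = 0 := by decide
theorem Mz_15_17 : Mz 15 17 = 0 := by decide
theorem Mz_16_0 : Mz 16 0 = 0 := by decide
theorem Mz_16_1 : Mz 16 1 = 0 := by decide
theorem Mz_16_2 : Mz 16 2 = 0 := by decide
theorem Mz_16_3 : Mz 16 3 = 0 := by decide
theorem Mz_16_4 : Mz 16 4 = 0 := by decide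
theorem Mz_16_5 : Mz 16 5 = 0 := by decide
theorem Mz_16_6 : Mz 16 6 = 0 := by decide
theorem Mz_16_7 : Mz 16 7 = 0 := by decide
theorem Mz_16_8 : Mz 16 8 = 0 := by decide
theorem Mz_16_9 : Mz 16 9 = 0 := by decide
theorem Mz_16_10 : Mz 16 10 = 1 := by decide
theorem Mz_16_11 : Mz 16 11 = 0 := by decide
theorem Mz_16_12 : Mz 16 12 = 0 := by decide
theorem Mz_16_13 : Mz 16 13 = 0 := by decide
theorem Mz_16_14 : Mz 16 14 = 1 := by decide
theorem Mz_16_15 : Mz 16 15 = 1 := by decide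
theorem Mz_16_16 : Mz 16 16 = 0 := by decide
theorem Mz_16_17 : Mz 16 17 = 0 := by decide
theorem Mz_17_0 : Mz 17 0 = 0 := by decide
theorem Mz_17_1 : Mz 17 1 = 0 := by decide
theorem Mz_17_2 : Mz 17 2 = 0 := by decide
theorem Mz_17_3 : Mz 17 3 = 0 := by decide
theorem Mz_17_4 : Mz 17 4 = 0 := by decide
theorem Mz_17_5 : Mz 17 5 = 0 := by decide
theorem Mz_17_6 : Mz 17 6 = 0 := by decide
theorem Mz_17_7 : Mz 17 7 = 0 := by decide
theorem Mz_17_8 : Mz 17 8 = 0 := by decide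
theorem Mz_17_9 : Mz 17 9 = 0 := by decide
theorem Mz_17_10 : Mz 17 10 = 1 := by decide
theorem Mz_17_11 : Mz 17 11 = 0 := by decide
theorem Mz_17_12 : Mz 17 12 = 0 := by decide
theorem Mz_17_13 : Mz 17 13 = 0 := by decide
theorem Mz_17_14 : Mz 17 14 = 1 := by decide
theorem Mz_17_15 : Mz 17 15 = 1 := by decide
theorem Mz_17_16 : Mz 17 16 = 0 := by decide
theorem Mz_17_17 : Mz 17 17 = 0 := by decide

theorem step_col_0 (d : StA) : castV (stepA d) 0 = Matrix.vecMul (castV d) Mz 0 := by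
  rw [vecMulApply18, sum18]
  simp only [castV_app_0, castV_app_1, castV_app_2, castV_app_3, castV_app_4, castV_app_5, castV_app_6, castV_app_7, castV_app_8, castV_app_9, castV_app_10, castV_app_11, castV_app_12, castV_app_13, castV_app_14, castV_app_15, castV_app_16, castV_app_17, Mz_0_0, Mz_1_0, Mz_2_0, Mz_3_0, Mz_4_0, Mz_5_0, Mz_6_0, Mz_7_0, Mz_8_0, Mz_9_0, Mz_10_0, Mz_11_0, Mz_12_0, Mz_13_0, Mz_14_0, Mz_15_0, Mz_16_0, Mz_17_0, mul_zero, mul_one, add_zero, zero_add, stepA, castZ_mod]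
  push_cast
  ring

theorem step_col_1 (d : StA) : castV (stepA d) 1 = Matrix.vecMul (castV d) Mz 1 := by
  rw [vecMulApply18, sum18]
  simp only [castV_app_0, castV_app_1, castV_app_2, castV_app_3, castV_app_4, castV_app_5, castV_app_6, castV_app_7, castV_app_8, castV_app_9, castV_app_10, castV_app_11, castV_app_12, castV_app_13, castV_app_14, castV_app_15, castV_app_16, castV_app_17, Mz_0_1, Mz_1_1, Mz_2_1, Mz_3_1, Mz_4_1, Mz_5_1, Mz_6_1, Mz_7_1, Mz_8_1, Mz_9_1, Mz_10_1, Mz_11_1, Mz_12_1, Mz_13_1, Mz_14_1, Mz_15_1, Mz_16_1, Mz_17_1, mul_zero, mul_one, add_zero, zero_add, stepA, castZ_mod]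
  push_cast
  ring

theorem step_col_2 (d : StA) : castV (stepA d) 2 = Matrix.vecMul (castV d) Mz 2 := by
  rw [vecMulApply18, sum18]
  simp only [castV_app_0, castV_app_1, castV_app_2, castV_app_3, castV_app_4, castV_app_5, castV_app_6, castV_app_7, castV_app_8, castV_app_9, castV_app_10, castV_app_11, castV_app_12, castV_app_13, castV_app_14, castV_app_15, castV_app_16, castV_app_17, Mz_0_2, Mz_1_2, Mz_2_2, Mz_3_2, Mz_4_2, Mz_5_2, Mz_6_2, Mz_7_2, Mz_8_2, Mz_9_2, Mz_10_2, Mz_11_2, Mz_12_2, Mz_13_2, Mz_14_2, Mz_15_2, Mz_16_2, Mz_17_2, mul_zero, mul_one, add_zero, zero_add, stepA, castZ_mod]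
  push_cast
  ring

theorem step_col_3 (d : StA) : castV (stepA d) 3 = Matrix.vecMul (castV d) Mz 3 := by
  rw [vecMulApply18, sum18]
  simp only [castV_app_0, castV_app_1, castV_app_2, castV_app_3, castV_app_4, castV_app_5, castV_app_6, castV_app_7, castV_app_8, castV_app_9, castV_app_10, castV_app_11, castV_app_12, castV_app_13, castV_app_14, castV_app_15, castV_app_16, castV_app_17, Mz_0_3, Mz_1_3, Mz_2_3, Mz_3_3, Mz_4_3, Mz_5_3, Mz_6_3, Mz_7_3, Mz_8_3, Mz_9_3, Mz_10_3, Mz_11_3, Mz_12_3, Mz_13_3, Mz_14_3, Mz_15_3, Mz_16_3, Mz_17_3, mul_zero, mul_one, add_zero, zero_add, stepA, castZ_mod]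
  push_cast
  ring

theorem step_col_4 (d : StA) : castV (stepA d) 4 = Matrix.vecMul (castV d) Mz 4 := by
  rw [vecMulApply18, sum18]
  simp only [castV_app_0, castV_app_1, castV_app_2, castV_app_3, castV_app_4, castV_app_5, castV_app_6, castV_app_7, castV_app_8, castV_app_9, castV_app_10, castV_app_11, castV_app_12, castV_app_13, castV_app_14, castV_app_15, castV_app_16, castV_app_17, Mz_0_4, Mz_1_4, Mz_2_4, Mz_3_4, Mz_4_4, Mz_5_4, Mz_6_4, Mz_7_4, Mz_8_4, Mz_9_4, Mz_10_4, Mz_11_4, Mz_12_4, Mz_13_4, Mz_14_4, Mz_15_4, Mz_16_4, Mz_17_4, mul_zero, mul_one, add_zero, zero_add, stepA, castZ_mod]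
  push_cast
  ring

theorem step_col_5 (d : StA) : castV (stepA d) 5 = Matrix.vecMul (castV d) Mz 5 := by
  rw [vecMulApply18, sum18]
  simp only [castV_app_0, castV_app_1, castV_app_2, castV_app_3, castV_app_4, castV_app_5, castV_app_6, castV_app_7, castV_app_8, castV_app_9, castV_app_10, castV_app_11, castV_app_12, castV_app_13, castV_app_14, castV_app_15, castV_app_16, castV_app_17, Mz_0_5, Mz_1_5, Mz_2_5, Mz_3_5, Mz_4_5, Mz_5_5, Mz_6_5, Mz_7_5, Mz_8_5, Mz_9_5, Mz_10_5, Mz_11_5, Mz_12_5, Mz_13_5, Mz_14_5, Mz_15_5, Mz_16_5, Mz_17_5, mul_zero, mul_one, add_zero, zero_add, stepA, castZ_mod]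
  push_cast
  ring

theorem step_col_6 (d : StA) : castV (stepA d) 6 = Matrix.vecMul (castV d) Mz 6 := by
  rw [vecMulApply18, sum18]
  simp only [castV_app_0, castV_app_1, castV_app_2, castV_app_3, castV_app_4, castV_app_5, castV_app_6, castV_app_7, castV_app_8, castV_app_9, castV_app_10, castV_app_11, castV_app_12, castV_app_13, castV_app_14, castV_app_15, castV_app_16, castV_app_17, Mz_0_6, Mz_1_6, Mz_2_6, Mz_3_6, Mz_4_6, Mz_5_6, Mz_6_6, Mz_7_6, Mz_8_6, Mz_9_6, Mz_10_6, Mz_11_6, Mz_12_6, Mz_13_6, Mz_14_6, Mz_15_6, Mz_16_6, Mz_17_6, mul_zero, mul_one, add_zero, zero_add, stepA, castZ_mod]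
  push_cast
  ring

theorem step_col_7 (d : StA) : castV (stepA d) 7 = Matrix.vecMul (castV d) Mz 7 := by
  rw [vecMulApply18, sum18]
  simp only [castV_app_0, castV_app_1, castV_app_2, castV_app_3, castV_app_4, castV_app_5, castV_app_6, castV_app_7, castV_app_8, castV_app_9, castV_app_10, castV_app_11, castV_app_12, castV_app_13, castV_app_14, castV_app_15, castV_app_16, castV_app_17, Mz_0_7, Mz_1_7, Mz_2_7, Mz_3_7, Mz_4_7, Mz_5_7, Mz_6_7, Mz_7_7, Mz_8_7, Mz_9_7, Mz_10_7, Mz_11_7, Mz_12_7, Mz_13_7, Mz_14_7, Mz_15_7, Mz_16_7, Mz_17_7, mul_zero, mul_one, add_zero, zero_add, stepA, castZ_mod]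
  push_cast
  ring

theorem step_col_8 (d : StA) : castV (stepA d) 8 = Matrix.vecMul (castV d) Mz 8 := by
  rw [vecMulApply18, sum18]
  simp only [castV_app_0, castV_app_1, castV_app_2, castV_app_3, castV_app_4, castV_app_5, castV_app_6, castV_app_7, castV_app_8, castV_app_9, castV_app_10, castV_app_11, castV_app_12, castV_app_13, castV_app_14, castV_app_15, castV_app_16, castV_app_17, Mz_0_8, Mz_1_8, Mz_2_8, Mz_3_8, Mz_4_8, Mz_5_8, Mz_6_8, Mz_7_8, Mz_8_8, Mz_9_8, Mz_10_8, Mz_11_8, Mz_12_8, Mz_13_8, Mz_14_8, Mz_15_8, Mz_16_8, Mz_17_8, mul_zero, mul_one, add_zero, zero_add, stepA, castZ_mod]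
  push_cast
  ring

theorem step_col_9 (d : StA) : castV (stepA d) 9 = Matrix.vecMul (castV d) Mz 9 := by
  rw [vecMulApply18, sum18]
  simp only [castV_app_0, castV_app_1, castV_app_2, castV_app_3, castV_app_4, castV_app_5, castV_app_6, castV_app_7, castV_app_8, castV_app_9, castV_app_10, castV_app_11, castV_app_12, castV_app_13, castV_app_14, castV_app_15, castV_app_16, castV_app_17, Mz_0_9, Mz_1_9, Mz_2_9, Mz_3_9, Mz_4_9, Mz_5_9, Mz_6_9, Mz_7_9, Mz_8_9, Mz_9_9, Mz_10_9, Mz_11_9, Mz_12_9, Mz_13_9, Mz_14_9, Mz_15_9, Mz_16_9, Mz_17_9, mul_zero, mul_one, add_zero, zero_add, stepA, castZ_mod]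
  push_cast
  ring

theorem step_col_10 (d : StA) : castV (stepA d) 10 = Matrix.vecMul (castV d) Mz 10 := by
  rw [vecMulApply18, sum18]
  simp only [castV_app_0, castV_app_1, castV_app_2, castV_app_3, castV_app_4, castV_app_5, castV_app_6, castV_app_7, castV_app_8, castV_app_9, castV_app_10, castV_app_11, castV_app_12, castV_app_13, castV_app_14, castV_app_15, castV_app_16, castV_app_17, Mz_0_10, Mz_1_10, Mz_2_10, Mz_3_10, Mz_4_10, Mz_5_10, Mz_6_10, Mz_7_10, Mz_8_10, Mz_9_10, Mz_10_10, Mz_11_10, Mz_12_10, Mz_13_10, Mz_14_10, Mz_15_10, Mz_16_10, Mz_17_10, mul_zero, mul_one, add_zero, zero_add, stepA, castZ_mod]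
  push_cast
  ring

theorem step_col_11 (d : StA) : castV (stepA d) 11 = Matrix.vecMul (castV d) Mz 11 := by
  rw [vecMulApply18, sum18]
  simp only [castV_app_0, castV_app_1, castV_app_2, castV_app_3, castV_app_4, castV_app_5, castV_app_6, castV_app_7, castV_app_8, castV_app_9, castV_app_10, castV_app_11, castV_app_12, castV_app_13, castV_app_14, castV_app_15, castV_app_16, castV_app_17, Mz_0_11, Mz_1_11, Mz_2_11, Mz_3_11, Mz_4_11, Mz_5_11, Mz_6_11, Mz_7_11, Mz_8_11, Mz_9_11, Mz_10_11, Mz_11_11, Mz_12_11, Mz_13_11, Mz_14_11, Mz_15_11, Mz_16_11, Mz_17_11, mul_zero, mul_one, add_zero, zero_add, stepA, castZ_mod]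
  push_cast
  ring

theorem step_col_12 (d : StA) : castV (stepA d) 12 = Matrix.vecMul (castV d) Mz 12 := by
  rw [vecMulApply18, sum18]
  simp only [castV_app_0, castV_app_1, castV_app_2, castV_app_3, castV_app_4, castV_app_5, castV_app_6, castV_app_7, castV_app_8, castV_app_9, castV_app_10, castV_app_11, castV_app_12, castV_app_13, castV_app_14, castV_app_15, castV_app_16, castV_app_17, Mz_0_12, Mz_1_12, Mz_2_12, Mz_3_12, Mz_4_12, Mz_5_12, Mz_6_12, Mz_7_12, Mz_8_12, Mz_9_12, Mz_10_12, Mz_11_12, Mz_12_12, Mz_13_12, Mz_14_12, Mz_15_12, Mz_16_12, Mz_17_12, mul_zero, mul_one, add_zero, zero_add, stepA, castZ_mod]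
  push_cast
  ring

theorem step_col_13 (d : StA) : castV (stepA d) 13 = Matrix.vecMul (castV d) Mz 13 := by
  rw [vecMulApply18, sum18]
  simp only [castV_app_0, castV_app_1, castV_app_2, castV_app_3, castV_app_4, castV_app_5, castV_app_6, castV_app_7, castV_app_8, castV_app_9, castV_app_10, castV_app_11, castV_app_12, castV_app_13, castV_app_14, castV_app_15, castV_app_16, castV_app_17, Mz_0_13, Mz_1_13, Mz_2_13, Mz_3_13, Mz_4_13, Mz_5_13, Mz_6_13, Mz_7_13, Mz_8_13, Mz_9_13, Mz_10_13, Mz_11_13, Mz_12_13, Mz_13_13, Mz_14_13, Mz_15_13, Mz_16_13, Mz_17_13, mul_zero, mul_one, add_zero, zero_add, stepA, castZ_mod]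
  push_cast
  ring

theorem step_col_14 (d : StA) : castV (stepA d) 14 = Matrix.vecMul (castV d) Mz 14 := by
  rw [vecMulApply18, sum18]
  simp only [castV_app_0, castV_app_1, castV_app_2, castV_app_3, castV_app_4, castV_app_5, castV_app_6, castV_app_7, castV_app_8, castV_app_9, castV_app_10, castV_app_11, castV_app_12, castV_app_13, castV_app_14, castV_app_15, castV_app_16, castV_app_17, Mz_0_14, Mz_1_14, Mz_2_14, Mz_3_14, Mz_4_14, Mz_5_14, Mz_6_14, Mz_7_14, Mz_8_14, Mz_9_14, Mz_10_14, Mz_11_14, Mz_12_14, Mz_13_14, Mz_14_14, Mz_15_14, Mz_16_14, Mz_17_14, mul_zero, mul_one, add_zero, zero_add, stepA, castZ_mod]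
  push_cast
  ring

theorem step_col_15 (d : StA) : castV (stepA d) 15 = Matrix.vecMul (castV d) Mz 15 := by
  rw [vecMulApply18, sum18]
  simp only [castV_app_0, castV_app_1, castV_app_2, castV_app_3, castV_app_4, castV_app_5, castV_app_6, castV_app_7, castV_app_8, castV_app_9, castV_app_10, castV_app_11, castV_app_12, castV_app_13, castV_app_14, castV_app_15, castV_app_16, castV_app_17, Mz_0_15, Mz_1_15, Mz_2_15, Mz_3_15, Mz_4_15, Mz_5_15, Mz_6_15, Mz_7_15, Mz_8_15, Mz_9_15, Mz_10_15, Mz_11_15, Mz_12_15, Mz_13_15, Mz_14_15, Mz_15_15, Mz_16_15, Mz_17_15, mul_zero, mul_one, add_zero, zero_add, stepA, castZ_mod]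
  push_cast
  ring

theorem step_col_16 (d : StA) : castV (stepA d) 16 = Matrix.vecMul (castV d) Mz 16 := by
  rw [vecMulApply18, sum18]
  simp only [castV_app_0, castV_app_1, castV_app_2, castV_app_3, castV_app_4, castV_app_5, castV_app_6, castV_app_7, castV_app_8, castV_app_9, castV_app_10, castV_app_11, castV_app_12, castV_app_13, castV_app_14, castV_app_15, castV_app_16, castV_app_17, Mz_0_16, Mz_1_16, Mz_2_16, Mz_3_16, Mz_4_16, Mz_5_16, Mz_6_16, Mz_7_16, Mz_8_16, Mz_9_16, Mz_10_16, Mz_11_16, Mz_12_16, Mz_13_16, Mz_14_16, Mz_15_16, Mz_16_16, Mz_17_16, mul_zero, mul_one, add_zero, zero_add, stepA, castZ_mod]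
  push_cast
  ring

theorem step_col_17 (d : StA) : castV (stepA d) 17 = Matrix.vecMul (castV d) Mz 17 := by
  rw [vecMulApply18, sum18]
  simp only [castV_app_0, castV_app_1, castV_app_2, castV_app_3, castV_app_4, castV_app_5, castV_app_6, castV_app_7, castV_app_8, castV_app_9, castV_app_10, castV_app_11, castV_app_12, castV_app_13, castV_app_14, castV_app_15, castV_app_16, castV_app_17, Mz_0_17, Mz_1_17, Mz_2_17, Mz_3_17, Mz_4_17, Mz_5_17, Mz_6_17, Mz_7_17, Mz_8_17, Mz_9_17, Mz_10_17, Mz_11_17, Mz_12_17, Mz_13_17, Mz_14_17, Mz_15_17, Mz_16_17, Mz_17_17, mul_zero, mul_one, add_zero, zero_add, stepA, castZ_mod]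
  push_cast
  ring


-- one DP step is multiplication by the fixed matrix
theorem step_eq_vecMul (d : StA) :
    castV (stepA d) = Matrix.vecMul (castV d) Mz := by
  funext i
  fin_cases i
  · exact step_col_0 d
  · exact step_col_1 d
  · exact step_col_2 d
  · exact step_col_3 d
  · exact step_col_4 d
  · exact step_col_5 d
  · exact step_col_6 d
  · exact step_col_7 d
  · exact step_col_8 d
  · exact step_col_9 d
  · exact step_col_10 d
  · exact step_col_11 d
  · exact step_col_12 d
  · exact step_col_13 d
  · exact step_col_14 d
  · exact step_col_15 d
  · exact step_col_16 d
  · exact step_col_17 d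

theorem iter_eq_pow (k : Nat) :
    castV (stepA^[k] initA) = Matrix.vecMul (castV initA) (Mz ^ k) := by
  induction k with
  | zero => simp
  | succ n ih =>
    rw [Function.iterate_succ_apply', step_eq_vecMul, ih, Matrix.vecMul_vecMul, pow_succ]

theorem ent_matmul (A B : List (List Int)) (i j : Fin 18) :
    entB (matmulB A B) i.val j.val
      = PySem.Int.mod (∑ k : Fin 18, entB A i.val k.val * entB B k.val j.val) 998244353 := by
  unfold entB matmulB
  rw [getD_mapRange _ _ _ i.isLt, getD_mapRange _ _ _ j.isLt, listsum18]

theorem castM_mul (A B : List (List Int)) :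
    castM (matmulB A B) = castM A * castM B := by
  funext i j
  simp only [castM, Matrix.mul_apply, Matrix.of_apply, ent_matmul, castZ_mod]
  push_cast
  rfl

theorem castM_id : castM idB = 1 := by
  funext i j
  simp only [castM, Matrix.of_apply, entB, idB]
  rw [getD_mapRange _ _ _ i.isLt, getD_mapRange _ _ _ j.isLt]
  by_cases h : i = j
  · simp [h, Matrix.one_apply]
  · have hv : ¬ i.val = j.val := fun hv => h (Fin.ext hv)
    simp [h, hv, Matrix.one_apply]

theorem matpow_cast (e : Nat) : ∀ A R : List (List Int),
    castM (matpowB A R e) = castM R * (castM A) ^ e := by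
  induction e using Nat.strong_induction_on with
  | _ e ih =>
    intro A R
    rw [matpowB]
    split_ifs with h0 h2
    · subst h0; simp
    · have he : e = 2 * (e / 2) + 1 := by have h5 := Nat.div_add_mod e 2; omega
      rw [ih (e / 2) (Nat.div_lt_self (Nat.pos_of_ne_zero h0) (by norm_num)), castM_mul]
      rw [show castM (matmulB A A) = (castM A) ^ 2 from by rw [castM_mul, sq]]
      rw [← pow_mul, mul_assoc, ← pow_succ']
      conv_rhs => rw [he]
    · have he : e = 2 * (e / 2) := by have h5 := Nat.div_add_mod e 2; omega
      rw [ih (e / 2) (Nat.div_lt_self (Nat.pos_of_ne_zero h0) (by norm_num))]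
      rw [show castM (matmulB A A) = (castM A) ^ 2 from by rw [castM_mul, sq]]
      rw [← pow_mul]
      conv_rhs => rw [he]

def v0f (i : Fin 18) : Int := if i.val = 0 ∨ i.val = 4 ∨ i.val = 8 then 1 else 0

theorem castV_init : castV initA = fun i => ((v0f i : Int) : ZMod 998244353) := by
  funext i
  fin_cases i <;> rfl

-- main lemma: B's row vector equals A's dp state, modulo 998244353
theorem main_vec (k : Nat) (j : ℕ) (hj : j < 18) :
    ((((List.range 18).map (fun i =>
        v0B.getD i 0 * ((matpowB matB idB k).getD i []).getD j 0)).sum : Int) : ZMod 998244353)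
      = castV (stepA^[k] initA) ⟨j, hj⟩ := by
  have hP : castM (matpowB matB idB k) = Mz ^ k := by
    rw [matpow_cast, castM_id, one_mul]; rfl
  have hv0 : ∀ i : Fin 18, v0B.getD i.val 0 = v0f i := fun i => getD_mapRange _ _ _ i.isLt
  have h1 : ((((List.range 18).map (fun i =>
        v0B.getD i 0 * ((matpowB matB idB k).getD i []).getD j 0)).sum : Int) : ZMod 998244353)
      = Matrix.vecMul (castV initA) (castM (matpowB matB idB k)) ⟨j, hj⟩ := by
    rw [listsum18, castV_init]
    push_cast
    simp only [hv0]
    rfl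
  rw [h1, hP, ← iter_eq_pow]

-- ===== VERDICT (by name: the statement is the Claim_ definition above) =====
theorem solve_spec : Claim_equal_solve := by
  intro s _
  unfold Spec_solve solve solve_alt
  rw [show pvAllEqAdjB = pvAllEqAdj from rfl, show pvAllNeAdjB = pvAllNeAdj from rfl,
    show pvOrdSumB = pvOrdSum from rfl]
  generalize s.toList = l
  by_cases h1 : pvAllEqAdj l
  · simp [h1]
  · simp only [h1, if_false, Bool.false_eq_true]
    by_cases h2 : l.length = 2
    · simp [h2]
    · simp only [h2, if_false]
      by_cases h3 : l.length = 3
      · simp only [h3, if_true, reduceIte]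
        obtain ⟨x, y, z, rfl⟩ : ∃ x y z, l = [x, y, z] := by
          rcases l with _ | ⟨x, _ | ⟨y, _ | ⟨z, _ | ⟨w, l⟩⟩⟩⟩ <;> simp_all
        simp [PySem.List.pyGet?, PySem.List.pyIdx?]
      · simp only [h3, if_false]
        apply mod_eq_of_castZ
        have hr0 : (0:Int) ≤ PySem.Int.mod (pvOrdSum l) 3 := PySem.Int.mod_nonneg _ (by norm_num)
        have hr3 : PySem.Int.mod (pvOrdSum l) 3 < 3 := PySem.Int.mod_lt _ (by norm_num)
        set r := PySem.Int.mod (pvOrdSum l) 3 with hr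
        set d := stepA^[l.length - 1] initA with hd
        set P := matpowB matB idB (l.length - 1) with hP2
        have hv : ∀ (jn : ℕ) (h : jn < 18),
            ((((List.range 18).map (fun i =>
                v0B.getD i 0 * (P.getD i []).getD jn 0)).sum % 998244353 : Int) : ZMod 998244353)
              = castV d ⟨jn, h⟩ := by
          intro jn h
          rw [← PySem.Int.mod_eq_emod_of_pos (by norm_num), castZ_mod, hP2, hd, main_vec]
        have hb9 := (hv 9 (by norm_num)).trans (castV_app_9 d)
        have hb10 := (hv 10 (by norm_num)).trans (castV_app_10 d)
        have hb11 := (hv 11 (by norm_num)).trans (castV_app_11 d)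
        have hb12 := (hv 12 (by norm_num)).trans (castV_app_12 d)
        have hb13 := (hv 13 (by norm_num)).trans (castV_app_13 d)
        have hb14 := (hv 14 (by norm_num)).trans (castV_app_14 d)
        have hb15 := (hv 15 (by norm_num)).trans (castV_app_15 d)
        have hb16 := (hv 16 (by norm_num)).trans (castV_app_16 d)
        have hb17 := (hv 17 (by norm_num)).trans (castV_app_17 d)
        simp only [List.getD_eq_getElem?_getD] at hb9 hb10 hb11 hb12 hb13 hb14 hb15 hb16 hb17
        have hg : ∀ (jn : ℕ) (h : jn < 18),
            ((List.range 18).map (fun j =>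
              PySem.Int.mod (((List.range 18).map (fun i =>
                v0B.getD i 0 * (P.getD i []).getD j 0)).sum) 998244353)).getD jn 0
            = PySem.Int.mod (((List.range 18).map (fun i =>
                v0B.getD i 0 * (P.getD i []).getD jn 0)).sum) 998244353 := fun jn h =>
          getD_mapRange _ _ _ h
        rw [hg 9 (by norm_num), hg 10 (by norm_num), hg 11 (by norm_num),
          hg 12 (by norm_num), hg 13 (by norm_num), hg 14 (by norm_num),
          hg 15 (by norm_num), hg 16 (by norm_num), hg 17 (by norm_num)]
        have hrc : r = 0 ∨ r = 1 ∨ r = 2 := by omega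
        rcases hrc with h | h | h
        · simp only [h]; norm_num
          rw [hb9, hb10, hb11]
        · simp only [h]; norm_num
          rw [hb12, hb13, hb14]
        · simp only [h]; norm_num
          rw [hb15, hb16, hb17]
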